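-- pv_equiv track=rewrite | github.com/joaosabino98/Energy-Management-for-Smart-Homes | processor/tools.py | compact_periods
-- ===== SOURCE A (Python) =====
-- def compact_periods(periods):
--     new_periods = {}
--     if periods:
--         block_start_time = next(iter(periods))[0]
--         block_end_time = next(iter(periods))[1]
--         block_energy = periods[next(iter(periods))]
--         for period in periods:
--             if periods[period] == block_energy:
--                 block_end_time = period[1]
--             else:
--                 new_periods[(block_start_time, block_end_time)] = block_energy
--                 block_start_time = period[0]
--                 block_end_time = period[1]
--                 block_energy = periods[period]
--         new_periods[(block_start_time, block_end_time)] = block_energy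
--     return new_periods
-- ===== SOURCE B (Python) =====
-- def compact_periods(periods):
--     items = list(periods.items())
--     new_periods = {}
--     while items:
--         (start, end), energy = items[0]
--         rest = items[1:]
--         while rest and rest[0][1] == energy:
--             end = rest[0][0][1]
--             rest = rest[1:]
--         new_periods[(start, end)] = energy
--         items = rest
--     return new_periods
-- ===== Notes on version B (the rewrite author's own statement) =====
-- stated objective: alternative
-- what changed: Replaces A's single pass that threads block start/end/energy state through the loop with a run-stripping decomposition: repeatedly take the maximal leading run of equal-energy periods, emit one merged period per run, and recurse on the remainder.
import Mathlib
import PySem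

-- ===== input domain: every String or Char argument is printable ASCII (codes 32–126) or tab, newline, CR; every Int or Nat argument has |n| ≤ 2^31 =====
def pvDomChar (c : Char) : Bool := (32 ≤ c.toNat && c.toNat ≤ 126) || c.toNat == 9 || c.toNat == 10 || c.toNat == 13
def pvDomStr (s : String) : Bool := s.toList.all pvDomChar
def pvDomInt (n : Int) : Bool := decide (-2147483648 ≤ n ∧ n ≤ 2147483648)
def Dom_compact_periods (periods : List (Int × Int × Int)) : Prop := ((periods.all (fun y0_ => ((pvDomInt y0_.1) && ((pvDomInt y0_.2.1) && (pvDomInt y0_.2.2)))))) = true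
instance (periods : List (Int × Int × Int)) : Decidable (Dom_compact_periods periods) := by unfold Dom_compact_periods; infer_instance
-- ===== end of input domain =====

-- B replaces A's single loop carrying block start/end/energy state by repeatedly
-- stripping a maximal run of equal-energy items from the front (objective: alternative decomposition).
-- The input dict is marshalled as an association list; PySem.Dict.ofList reproduces
-- Python's dict construction (later duplicate keys overwrite, first position kept).

-- ===== PORT A =====
def compact_periods (periods : List (Int × Int × Int)) : List (Int × Int × Int) :=
  let ps : PySem.Dict (Int × Int) Int :=
    PySem.Dict.ofList (periods.map (fun p => ((p.1, p.2.1), p.2.2)))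
  match ps.items with
  | [] => []
  | ((s0, e0), _) :: _ =>
    -- block_energy = periods[first key]; the key is present, so get? is some (.getD 0 never fires)
    let st := ps.items.foldl
      (fun (acc : Int × Int × Int × PySem.Dict (Int × Int) Int) kv =>
        if (ps.get? kv.1).getD 0 == acc.2.2.1 then
          (acc.1, kv.1.2, acc.2.2.1, acc.2.2.2)
        else
          (kv.1.1, kv.1.2, (ps.get? kv.1).getD 0,
            acc.2.2.2.insert (acc.1, acc.2.1) acc.2.2.1))
      (s0, e0, (ps.get? (s0, e0)).getD 0, PySem.Dict.empty)
    (st.2.2.2.insert (st.1, st.2.1) st.2.2.1).items.map (fun kv => (kv.1.1, kv.1.2, kv.2))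

-- ===== PORT B =====
-- inner while: consume the leading run of items whose energy equals `energy`, tracking the end time
def cpEat (energy : Int) (e : Int) : List ((Int × Int) × Int) → Int × List ((Int × Int) × Int)
  | [] => (e, [])
  | kv :: rest => if kv.2 == energy then cpEat energy kv.1.2 rest else (e, kv :: rest)

theorem cpEat_length (energy e : Int) (l : List ((Int × Int) × Int)) :
    (cpEat energy e l).2.length ≤ l.length := by
  induction l generalizing e with
  | nil => simp [cpEat]
  | cons kv rest ih =>
    simp only [cpEat]
    split
    · exact Nat.le_succ_of_le (ih _)
    · simp

-- outer while: strip one maximal run, record it, continue on the remainder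
def cpRuns : List ((Int × Int) × Int) → PySem.Dict (Int × Int) Int → PySem.Dict (Int × Int) Int
  | [], d => d
  | kv :: rest, d =>
    cpRuns (cpEat kv.2 kv.1.2 rest).2
      (d.insert (kv.1.1, (cpEat kv.2 kv.1.2 rest).1) kv.2)
termination_by l _ => l.length
decreasing_by exact Nat.lt_succ_of_le (cpEat_length _ _ _)

def compact_periods_alt (periods : List (Int × Int × Int)) : List (Int × Int × Int) :=
  let items := (PySem.Dict.ofList (periods.map (fun p => ((p.1, p.2.1), p.2.2)))).items
  (cpRuns items PySem.Dict.empty).items.map (fun kv => (kv.1.1, kv.1.2, kv.2))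

-- ===== PRECONDITION & SPEC =====
def Spec_compact_periods (periods : List (Int × Int × Int)) (out : List (Int × Int × Int)) : Prop := out = compact_periods_alt periods
instance (periods : List (Int × Int × Int)) (out : List (Int × Int × Int)) : Decidable (Spec_compact_periods periods out) := by unfold Spec_compact_periods; infer_instance

-- ===== CLAIM (what is proved, stated in full; the proofs are below) =====
def Claim_equal_compact_periods : Prop := ∀ (periods : List (Int × Int × Int)), Dom_compact_periods periods → Spec_compact_periods periods (compact_periods periods)

-- ===== LEMMAS AND PROOFS =====

-- A's loop body once the dict lookup is resolved to the item's own value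
def cpStepA (acc : Int × Int × Int × PySem.Dict (Int × Int) Int) (kv : (Int × Int) × Int) :
    Int × Int × Int × PySem.Dict (Int × Int) Int :=
  if kv.2 == acc.2.2.1 then (acc.1, kv.1.2, acc.2.2.1, acc.2.2.2)
  else (kv.1.1, kv.1.2, kv.2, acc.2.2.2.insert (acc.1, acc.2.1) acc.2.2.1)

theorem cpRuns_nil (d : PySem.Dict (Int × Int) Int) : cpRuns [] d = d := by
  rw [cpRuns]

theorem cpRuns_cons (kv : (Int × Int) × Int) (rest : List ((Int × Int) × Int))
    (d : PySem.Dict (Int × Int) Int) :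
    cpRuns (kv :: rest) d
      = cpRuns (cpEat kv.2 kv.1.2 rest).2
          (d.insert (kv.1.1, (cpEat kv.2 kv.1.2 rest).1) kv.2) := by
  rw [cpRuns]

theorem cpMain (l : List ((Int × Int) × Int)) (s e v : Int)
    (d : PySem.Dict (Int × Int) Int) :
    (fun st : Int × Int × Int × PySem.Dict (Int × Int) Int =>
        st.2.2.2.insert (st.1, st.2.1) st.2.2.1) (l.foldl cpStepA (s, e, v, d))
      = cpRuns (((s, e), v) :: l) d := by
  induction l generalizing s e v d with
  | nil => rw [cpRuns_cons]; simp [cpEat, cpRuns_nil]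
  | cons kv rest ih =>
    by_cases h : kv.2 = v
    · have hr : cpRuns (((s, e), v) :: kv :: rest) d = cpRuns (((s, kv.1.2), v) :: rest) d := by
        rw [cpRuns_cons, cpRuns_cons]
        simp [cpEat, h]
      rw [hr, ← ih]
      simp [cpStepA, h]
    · have hr : cpRuns (((s, e), v) :: kv :: rest) d
          = cpRuns (kv :: rest) (d.insert (s, e) v) := by
        conv_lhs => rw [cpRuns_cons]
        simp [cpEat, h]
      rw [hr, ← ih kv.1.1 kv.1.2 kv.2 (d.insert (s, e) v)]
      simp [cpStepA, h]

theorem compact_periods_eq (periods : List (Int × Int × Int)) :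
    compact_periods periods = compact_periods_alt periods := by
  simp only [compact_periods, compact_periods_alt]
  set ps : PySem.Dict (Int × Int) Int :=
    PySem.Dict.ofList (periods.map (fun p => ((p.1, p.2.1), p.2.2))) with hps
  have hnd : ps.keys.Nodup := PySem.Dict.nodup_keys_ofList _
  have hget : ∀ kv ∈ ps.items, ps.get? kv.1 = some kv.2 := by
    intro kv hkv
    exact PySem.Dict.get?_of_mem_items ps (by rwa [Prod.mk.eta]) hnd
  rcases hit : ps.items with _ | ⟨⟨⟨s0, e0⟩, v0⟩, tl⟩
  · rw [cpRuns_nil]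
    rfl
  · dsimp only
    have hv0 : (ps.get? (s0, e0)).getD 0 = v0 := by
      rw [hget ((s0, e0), v0) (by rw [hit]; exact List.mem_cons_self)]
      rfl
    rw [hv0]
    have hcongr : (((s0, e0), v0) :: tl).foldl
        (fun (acc : Int × Int × Int × PySem.Dict (Int × Int) Int) kv =>
          if (ps.get? kv.1).getD 0 == acc.2.2.1 then
            (acc.1, kv.1.2, acc.2.2.1, acc.2.2.2)
          else
            (kv.1.1, kv.1.2, (ps.get? kv.1).getD 0,
              acc.2.2.2.insert (acc.1, acc.2.1) acc.2.2.1))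
        (s0, e0, v0, PySem.Dict.empty)
        = (((s0, e0), v0) :: tl).foldl cpStepA (s0, e0, v0, PySem.Dict.empty) := by
      apply PySem.List.foldl_congr_mem
      intro acc kv hkv
      rw [hget kv (by rw [hit]; exact hkv)]
      rfl
    rw [hcongr]
    have hhead : (((s0, e0), v0) :: tl).foldl cpStepA (s0, e0, v0, PySem.Dict.empty)
        = tl.foldl cpStepA (s0, e0, v0, PySem.Dict.empty) := by
      simp [cpStepA]
    rw [hhead]
    have hmain := cpMain tl s0 e0 v0 PySem.Dict.empty
    simp only at hmain
    rw [hmain]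

-- ===== VERDICT (by name: the statement is the Claim_ definition above) =====
theorem compact_periods_spec : Claim_equal_compact_periods := by
  intro periods _
  unfold Spec_compact_periods
  exact compact_periods_eq periods
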